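-- pv_equiv track=rewrite | github.com/ray-cast/AlphaGPT | model_core/engine.py | _valid_prefix_len
-- ===== SOURCE A (Python) =====
-- def _valid_prefix_len(tokens, feat_count, arity_map):
--     """计算合法前缀表达式的实际长度（去除填充部分）。"""
--     open_slots = 1
--     for i, t in enumerate(tokens):
--         t = int(t)
--         if t < feat_count:
--             open_slots -= 1
--         elif t in arity_map:
--             open_slots += arity_map[t] - 1
--         else:
--             return i
--         if open_slots <= 0:
--             return i + 1
--     return len(tokens)
-- ===== SOURCE B (Python) =====
-- def _valid_prefix_len(tokens, feat_count, arity_map):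
--     """Iterative prefix-expression parser: maintains a stack of outstanding
--     child counts (one frame per unfinished operator) instead of a single
--     open-slot counter."""
--     n = len(tokens)
--     need = [1]  # stack of outstanding child counts; top at the end
--     i = 0
--     while need:
--         if i >= n:
--             return n
--         t = int(tokens[i])
--         if t < feat_count:
--             k = 0
--         else:
--             k = arity_map.get(t)
--             if k is None:
--                 return i
--         i += 1
--         need[-1] -= 1
--         if k > 0:
--             need.append(k)
--         else:
--             while need and need[-1] == 0:
--                 need.pop()
--     return i
-- ===== Notes on version B (the rewrite author's own statement) =====
-- stated objective: alternative
-- what changed: Replaces A's single open-slot counter with an explicit parser stack of outstanding child counts (one frame per unfinished operator), popping completed frames as subexpressions close.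
-- outside the precondition, e.g. on _valid_prefix_len([6, 5, 0], 5, {6: 2, 5: -1}): A returns 2, B returns 3
import Mathlib
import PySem

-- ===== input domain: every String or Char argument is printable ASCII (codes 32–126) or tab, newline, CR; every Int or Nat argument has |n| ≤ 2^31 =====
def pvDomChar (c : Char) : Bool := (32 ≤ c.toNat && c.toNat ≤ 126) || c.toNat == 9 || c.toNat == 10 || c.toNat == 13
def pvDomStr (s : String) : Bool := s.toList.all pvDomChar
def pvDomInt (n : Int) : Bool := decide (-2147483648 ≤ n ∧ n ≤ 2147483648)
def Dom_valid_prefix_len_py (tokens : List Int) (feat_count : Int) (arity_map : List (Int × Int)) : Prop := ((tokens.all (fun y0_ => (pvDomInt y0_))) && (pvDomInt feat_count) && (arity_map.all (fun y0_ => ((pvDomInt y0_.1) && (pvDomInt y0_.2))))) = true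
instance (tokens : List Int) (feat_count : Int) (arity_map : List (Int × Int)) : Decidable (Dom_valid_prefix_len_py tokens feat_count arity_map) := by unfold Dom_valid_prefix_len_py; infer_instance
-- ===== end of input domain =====

-- B replaces A's single open-slot counter by an explicit parser stack of outstanding
-- child counts (objective: alternative decomposition, same O(n) cost).

-- ===== PORT A =====
-- the for-loop of A: `rest` is the unprocessed suffix, `i` the current index, `os` = open_slots
def pvALoop (n : Int) (feat_count : Int) (arity_map : List (Int × Int)) :
    List Int → Int → Int → Int
  | [], _, _ => n                                   -- loop exhausted: return len(tokens)
  | t :: rs, i, os =>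
    if t < feat_count then
      let os' := os - 1
      if os' ≤ 0 then i + 1 else pvALoop n feat_count arity_map rs (i + 1) os'
    else
      match PySem.Dict.get? (PySem.Dict.mk arity_map) t with   -- `t in arity_map` / `arity_map[t]`
      | some a =>
        let os' := os + a - 1
        if os' ≤ 0 then i + 1 else pvALoop n feat_count arity_map rs (i + 1) os'
      | none => i

def valid_prefix_len_py (tokens : List Int) (feat_count : Int) (arity_map : List (Int × Int)) : Int :=
  pvALoop (tokens.length : Int) feat_count arity_map tokens 0 1

-- ===== PORT B =====
-- `while need and need[-1] == 0: need.pop()` (stack top = list head here)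
def pvPopZeros : List Int → List Int
  | [] => []
  | h :: t => if h = 0 then pvPopZeros t else h :: t

-- the while-loop of B: `rest` unprocessed suffix, `i` index, `need` the frame stack
def pvBLoop (n : Int) (feat_count : Int) (arity_map : List (Int × Int)) :
    List Int → Int → List Int → Int
  | rest, i, need =>
    match need with
    | [] => i                                       -- while-condition false: return i
    | h :: tl =>
      match rest with
      | [] => n                                     -- i >= n: return n
      | t :: rs =>
        let k? : Option Int :=
          if t < feat_count then some 0 else PySem.Dict.get? (PySem.Dict.mk arity_map) t
        match k? with
        | none => i                                 -- invalid token
        | some k =>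
          if k > 0 then pvBLoop n feat_count arity_map rs (i + 1) (k :: (h - 1) :: tl)
          else pvBLoop n feat_count arity_map rs (i + 1) (pvPopZeros ((h - 1) :: tl))

def valid_prefix_len_py_alt (tokens : List Int) (feat_count : Int) (arity_map : List (Int × Int)) : Int :=
  pvBLoop (tokens.length : Int) feat_count arity_map tokens 0 [1]

-- ===== PRECONDITION & SPEC =====
-- Pre_ restricts arity_map to genuine arities (values ≥ 0), the natural domain of an arity
-- map; on nonsense negative arities A's counter can close several slots in one step, which a
-- parser cannot mirror, so those inputs are excluded.
def Pre_valid_prefix_len_py (tokens : List Int) (feat_count : Int) (arity_map : List (Int × Int)) : Prop :=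
  ∀ p ∈ arity_map, 0 ≤ p.2
instance (tokens : List Int) (feat_count : Int) (arity_map : List (Int × Int)) : Decidable (Pre_valid_prefix_len_py tokens feat_count arity_map) := by unfold Pre_valid_prefix_len_py; infer_instance

def pvWitness_valid_prefix_len_py : List Int × Int × (List (Int × Int)) := ([1, 0, 0], 1, [(1, 2)])

def Spec_valid_prefix_len_py (tokens : List Int) (feat_count : Int) (arity_map : List (Int × Int)) (out : Int) : Prop := out = valid_prefix_len_py_alt tokens feat_count arity_map
instance (tokens : List Int) (feat_count : Int) (arity_map : List (Int × Int)) (out : Int) : Decidable (Spec_valid_prefix_len_py tokens feat_count arity_map out) := by unfold Spec_valid_prefix_len_py; infer_instance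

-- ===== CLAIM (what is proved, stated in full; the proofs are below) =====
def Claim_equal_valid_prefix_len_py : Prop := ∀ (tokens : List Int) (feat_count : Int) (arity_map : List (Int × Int)), Dom_valid_prefix_len_py tokens feat_count arity_map → Pre_valid_prefix_len_py tokens feat_count arity_map → Spec_valid_prefix_len_py tokens feat_count arity_map (valid_prefix_len_py tokens feat_count arity_map)

-- ===== LEMMAS AND PROOFS =====

lemma pvGet?_mem {m : List (Int × Int)} {t a : Int}
    (h : PySem.Dict.get? (PySem.Dict.mk m) t = some a) : (t, a) ∈ m := by
  induction m with
  | nil => simp [PySem.Dict.get?] at h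
  | cons p rest ih =>
    rw [show (p : Int × Int) = (p.1, p.2) from rfl, PySem.Dict.get?_mk_cons] at h
    by_cases hk : p.1 == t
    · simp [hk] at h
      have hp : (t, a) = p := by
        have h1 := beq_iff_eq.mp hk
        subst h; simp [← h1]
      rw [hp]; exact List.mem_cons_self
    · simp [hk] at h
      right; exact ih h

lemma pvPopZeros_sum (l : List Int) : (pvPopZeros l).sum = l.sum := by
  induction l with
  | nil => rfl
  | cons h t ih =>
    by_cases h0 : h = 0
    · simp [pvPopZeros, h0, ih]
    · simp [pvPopZeros, h0]

lemma pvSum_nonneg (l : List Int) (hl : ∀ x ∈ l, 0 ≤ x) : 0 ≤ l.sum := by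
  induction l with
  | nil => simp
  | cons h t ih =>
    simp only [List.sum_cons]
    have := hl h (List.mem_cons_self)
    have := ih (fun x hx => hl x (List.mem_cons_of_mem _ hx))
    omega

lemma pvPopZeros_nil_iff (l : List Int) (hl : ∀ x ∈ l, 0 ≤ x) :
    pvPopZeros l = [] ↔ l.sum ≤ 0 := by
  induction l with
  | nil => simp [pvPopZeros]
  | cons h t ih =>
    have hh := hl h (List.mem_cons_self)
    have ht : ∀ x ∈ t, 0 ≤ x := fun x hx => hl x (List.mem_cons_of_mem _ hx)
    have hts := pvSum_nonneg t ht
    by_cases h0 : h = 0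
    · rw [show pvPopZeros (h :: t) = pvPopZeros t by simp [pvPopZeros, h0]]
      simp only [List.sum_cons]
      rw [ih ht]; omega
    · rw [show pvPopZeros (h :: t) = h :: t by simp [pvPopZeros, h0]]
      simp only [List.sum_cons]
      constructor
      · intro hc; cases hc
      · intro hc; omega

lemma pvPopZeros_shape (l : List Int) (hl : ∀ x ∈ l, 0 ≤ x) :
    pvPopZeros l = [] ∨ ∃ h' tl', pvPopZeros l = h' :: tl' ∧ 1 ≤ h' ∧ ∀ x ∈ tl', 0 ≤ x := by
  induction l with
  | nil => left; rfl
  | cons h t ih =>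
    have hh := hl h (List.mem_cons_self)
    have ht : ∀ x ∈ t, 0 ≤ x := fun x hx => hl x (List.mem_cons_of_mem _ hx)
    by_cases h0 : h = 0
    · simpa only [pvPopZeros, h0, if_pos rfl] using ih ht
    · right; exact ⟨h, t, by simp [pvPopZeros, h0], by omega, ht⟩

-- main invariant: the open-slot counter equals the sum of the frame stack
lemma pvLoop_eq (n feat_count : Int) (arity_map : List (Int × Int))
    (hm : ∀ p ∈ arity_map, 0 ≤ p.2) :
    ∀ (rest : List Int) (i h : Int) (tl : List Int), 1 ≤ h → (∀ x ∈ tl, 0 ≤ x) →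
      pvALoop n feat_count arity_map rest i (h + tl.sum) =
      pvBLoop n feat_count arity_map rest i (h :: tl) := by
  intro rest
  induction rest with
  | nil => intro i h tl _ _; rfl
  | cons t rs ih =>
    intro i h tl hh htl
    have hts : 0 ≤ tl.sum := pvSum_nonneg tl htl
    by_cases hlt : t < feat_count
    · -- leaf: k = 0
      have hstep : ∀ x ∈ (h - 1) :: tl, 0 ≤ x := by
        intro x hx; rcases List.mem_cons.mp hx with h1 | h2
        · omega
        · exact htl x h2
      rcases pvPopZeros_shape ((h - 1) :: tl) hstep with hnil | ⟨h', tl', heq, hh', htl'⟩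
      · have hsum : h + tl.sum - 1 ≤ 0 := by
          have := (pvPopZeros_nil_iff _ hstep).mp hnil
          simp [List.sum_cons] at this; omega
        simp [pvALoop, pvBLoop, hlt, hnil]
        exact fun hc => absurd hc (by omega)
      · have hsum : ¬ (h + tl.sum - 1 ≤ 0) := by
          have h1 := pvPopZeros_sum ((h - 1) :: tl)
          rw [heq] at h1
          have h2 : 0 ≤ tl'.sum := pvSum_nonneg tl' htl'
          simp [List.sum_cons] at h1; omega
        have hsum' : h' + tl'.sum = h + tl.sum - 1 := by
          have h1 := pvPopZeros_sum ((h - 1) :: tl)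
          rw [heq] at h1; simp [List.sum_cons] at h1; omega
        simp only [pvALoop, pvBLoop, if_pos hlt, if_neg hsum, heq]
        rw [show h + tl.sum - 1 = h' + tl'.sum from hsum'.symm]
        simpa using ih (i + 1) h' tl' hh' htl'
    · -- operator or invalid
      cases hget : PySem.Dict.get? (PySem.Dict.mk arity_map) t with
      | none => simp [pvALoop, pvBLoop, hlt, hget]
      | some a =>
        have ha : 0 ≤ a := hm (t, a) (pvGet?_mem hget)
        by_cases hpos : a > 0
        · have hsum : ¬ (h + tl.sum + a - 1 ≤ 0) := by omega
          have hstep : ∀ x ∈ (h - 1) :: tl, 0 ≤ x := by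
            intro x hx; rcases List.mem_cons.mp hx with h1 | h2
            · omega
            · exact htl x h2
          simp only [pvALoop, pvBLoop, if_neg hlt, hget, if_neg hsum, if_pos hpos]
          have := ih (i + 1) a ((h - 1) :: tl) (by omega) hstep
          rw [show h + tl.sum + a - 1 = a + ((h - 1) :: tl).sum by simp [List.sum_cons]; ring]
          simpa using this
        · -- a = 0: behaves as a leaf
          have ha0 : a = 0 := by omega
          subst ha0
          have hstep : ∀ x ∈ (h - 1) :: tl, 0 ≤ x := by
            intro x hx; rcases List.mem_cons.mp hx with h1 | h2
            · omega
            · exact htl x h2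
          rcases pvPopZeros_shape ((h - 1) :: tl) hstep with hnil | ⟨h', tl', heq, hh', htl'⟩
          · have hsum : h + tl.sum + 0 - 1 ≤ 0 := by
              have := (pvPopZeros_nil_iff _ hstep).mp hnil
              simp [List.sum_cons] at this; omega
            simp [pvALoop, pvBLoop, hlt, hget, hnil]
            exact fun hc => absurd hc (by omega)
          · have hsum : ¬ (h + tl.sum + 0 - 1 ≤ 0) := by
              have h1 := pvPopZeros_sum ((h - 1) :: tl)
              rw [heq] at h1
              have h2 : 0 ≤ tl'.sum := pvSum_nonneg tl' htl'
              simp [List.sum_cons] at h1; omega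
            have hsum' : h' + tl'.sum = h + tl.sum - 1 := by
              have h1 := pvPopZeros_sum ((h - 1) :: tl)
              rw [heq] at h1; simp [List.sum_cons] at h1; omega
            simp only [pvALoop, pvBLoop, if_neg hlt, hget, if_neg hsum, hpos, if_neg hpos, heq]
            rw [show h + tl.sum + 0 - 1 = h' + tl'.sum by omega]
            simpa using ih (i + 1) h' tl' hh' htl'

-- ===== VERDICT (by name: the statement is the Claim_ definition above) =====
theorem valid_prefix_len_py_spec : Claim_equal_valid_prefix_len_py := by
  intro tokens feat_count arity_map _ hpre
  unfold Spec_valid_prefix_len_py valid_prefix_len_py valid_prefix_len_py_alt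
  have := pvLoop_eq (tokens.length : Int) feat_count arity_map hpre tokens 0 1 [] (by norm_num) (by simp)
  simpa using this
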